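-- pv_equiv track=rewrite | github.com/perplext/AmpSwiftUI | tools/local_storage/keychain_analyzer.py | _is_plaintext
-- ===== SOURCE A (Python) =====
-- def _is_plaintext(data: str) -> bool:
--     """Check if data appears to be plaintext"""
--     if not data:
--         return False
--
--     # Check if it's printable ASCII
--     try:
--         if all(32 <= ord(c) < 127 for c in data):
--             # Check if it looks like a password pattern
--             has_upper = any(c.isupper() for c in data)
--             has_lower = any(c.islower() for c in data)
--             has_digit = any(c.isdigit() for c in data)
--
--             if has_upper and has_lower and has_digit:
--                 return True
--     except:
--         pass
--
--     return False
-- ===== SOURCE B (Python) =====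
-- def _is_plaintext(data: str) -> bool:
--     """Single pass over data: bail on the first non-printable char, track case/digit flags."""
--     if not data:
--         return False
--     has_upper = has_lower = has_digit = False
--     for c in data:
--         o = ord(c)
--         if o < 32 or o >= 127:
--             return False
--         if c.isupper():
--             has_upper = True
--         if c.islower():
--             has_lower = True
--         if c.isdigit():
--             has_digit = True
--     return has_upper and has_lower and has_digit
-- ===== Notes on version B (the rewrite author's own statement) =====
-- stated objective: simpler
-- what changed: Replaces A's four separate scans (all-printable check plus three any() passes) with one loop that maintains three flags and returns False at the first non-printable character; the dead try/except is dropped.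
import Mathlib
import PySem

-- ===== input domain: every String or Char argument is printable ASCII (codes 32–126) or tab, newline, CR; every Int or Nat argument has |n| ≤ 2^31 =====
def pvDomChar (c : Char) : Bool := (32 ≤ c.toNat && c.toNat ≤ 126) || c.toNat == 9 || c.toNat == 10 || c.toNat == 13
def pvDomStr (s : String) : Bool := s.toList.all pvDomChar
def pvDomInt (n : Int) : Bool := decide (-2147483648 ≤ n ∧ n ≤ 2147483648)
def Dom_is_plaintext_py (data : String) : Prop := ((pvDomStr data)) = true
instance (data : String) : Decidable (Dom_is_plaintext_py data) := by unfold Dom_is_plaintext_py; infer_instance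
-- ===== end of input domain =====

-- B replaces A's four scans with one pass keeping three flags; objective: simpler.

-- ===== PORT A =====
-- A: empty → False; if all chars printable ASCII, return has_upper && has_lower && has_digit; else False.
def is_plaintext_py (data : String) : Bool :=
  let cs := data.toList
  if cs.isEmpty then false
  else if cs.all (fun c => 32 ≤ c.toNat && c.toNat < 127) then
    let has_upper := cs.any PySem.Chars.isupper
    let has_lower := cs.any PySem.Chars.islower
    let has_digit := cs.any PySem.Chars.isdigit
    if has_upper && has_lower && has_digit then true else false
  else false

-- ===== PORT B =====
-- single pass: bail at first non-printable char, set the three flags as we go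
def is_plaintext_py_altGo : List Char → Bool → Bool → Bool → Bool
  | [], hu, hl, hd => hu && hl && hd
  | c :: cs, hu, hl, hd =>
    if c.toNat < 32 || 127 ≤ c.toNat then false
    else
      is_plaintext_py_altGo cs
        (if PySem.Chars.isupper c then true else hu)
        (if PySem.Chars.islower c then true else hl)
        (if PySem.Chars.isdigit c then true else hd)

def is_plaintext_py_alt (data : String) : Bool :=
  if data.toList.isEmpty then false
  else is_plaintext_py_altGo data.toList false false false

-- ===== PRECONDITION & SPEC =====
def Spec_is_plaintext_py (data : String) (out : Bool) : Prop := out = is_plaintext_py_alt data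
instance (data : String) (out : Bool) : Decidable (Spec_is_plaintext_py data out) := by unfold Spec_is_plaintext_py; infer_instance

-- ===== CLAIM (what is proved, stated in full; the proofs are below) =====
def Claim_equal_is_plaintext_py : Prop := ∀ (data : String), Dom_is_plaintext_py data → Spec_is_plaintext_py data (is_plaintext_py data)

-- ===== LEMMAS AND PROOFS =====

theorem altGo_eq (cs : List Char) : ∀ (hu hl hd : Bool),
    is_plaintext_py_altGo cs hu hl hd =
      if cs.all (fun c => 32 ≤ c.toNat && c.toNat < 127) then
        (hu || cs.any PySem.Chars.isupper) && (hl || cs.any PySem.Chars.islower)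
          && (hd || cs.any PySem.Chars.isdigit)
      else false := by
  induction cs with
  | nil => intro hu hl hd; simp [is_plaintext_py_altGo]
  | cons c cs ih =>
    intro hu hl hd
    simp only [is_plaintext_py_altGo, List.all_cons, List.any_cons]
    by_cases hp : c.toNat < 32 ∨ 127 ≤ c.toNat
    · have : (32 ≤ c.toNat && c.toNat < 127) = false := by
        simp; omega
      simp [hp, this]
    · push Not at hp
      have hc : (c.toNat < 32 || 127 ≤ c.toNat) = false := by simp; omega
      have hc' : (32 ≤ c.toNat && c.toNat < 127) = true := by simp; omega
      rw [hc, if_neg (by simp), ih]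
      simp only [hc', Bool.true_and]
      cases PySem.Chars.isupper c <;> cases PySem.Chars.islower c
        <;> cases PySem.Chars.isdigit c
        <;> cases hu <;> cases hl <;> cases hd <;> simp

-- ===== VERDICT (by name: the statement is the Claim_ definition above) =====
theorem is_plaintext_py_spec : Claim_equal_is_plaintext_py := by
  intro data _
  unfold Spec_is_plaintext_py is_plaintext_py is_plaintext_py_alt
  by_cases h : data.toList.isEmpty
  · simp [h]
  · rw [if_neg h, if_neg h, altGo_eq]
    by_cases hall : (data.toList.all fun c => 32 ≤ c.toNat && c.toNat < 127) = true
    · rw [if_pos hall, if_pos hall]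
      simp only [Bool.false_or]
      cases hb : (data.toList.any PySem.Chars.isupper && data.toList.any PySem.Chars.islower
          && data.toList.any PySem.Chars.isdigit) <;> simp
    · rw [if_neg hall, if_neg hall]
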